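-- pv_equiv track=rewrite | github.com/Rookiee111/MIT-Python6.00.2x | Algorithm_comparison.py | algocomplexitycheck1
-- ===== SOURCE A (Python) =====
-- def algocomplexitycheck1(lst):
--     count = 0
--     for i in range(len(lst)):
--         count += 1
--         for j in range(i+1, len(lst)):
--             count += 1
--             if lst[i] > lst[j]:
--                 #count += 1
--                 temp = lst[i]
--                 lst[i] = lst[j]
--                 lst[j] = temp
--     min = lst[0]
--     return min, count
-- ===== SOURCE B (Python) =====
-- def algocomplexitycheck1(lst):
--     # closed-form comparison count; sort in place (A's loop also leaves lst sorted)
--     lst.sort()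
--     n = len(lst)
--     return lst[0], n + n * (n - 1) // 2
-- ===== Notes on version B (the rewrite author's own statement) =====
-- stated objective: faster
-- what changed: Replaced the quadratic compare-and-swap double loop by lst.sort() (same in-place sorted result), taking the minimum as the first sorted element and computing the operation count by the closed form n + n*(n-1)//2.
import Mathlib
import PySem

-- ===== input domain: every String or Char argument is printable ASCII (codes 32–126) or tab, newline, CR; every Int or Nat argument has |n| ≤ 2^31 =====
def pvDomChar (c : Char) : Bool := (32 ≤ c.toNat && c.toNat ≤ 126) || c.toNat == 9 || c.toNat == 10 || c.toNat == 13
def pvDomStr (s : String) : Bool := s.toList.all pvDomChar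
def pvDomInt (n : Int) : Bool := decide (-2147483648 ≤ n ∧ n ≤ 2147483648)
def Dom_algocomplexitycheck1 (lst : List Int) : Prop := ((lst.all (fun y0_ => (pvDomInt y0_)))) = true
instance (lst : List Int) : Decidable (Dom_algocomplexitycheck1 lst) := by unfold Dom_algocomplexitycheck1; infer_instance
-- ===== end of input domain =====

-- B replaces A's quadratic compare-and-swap double loop by a library sort plus the closed-form
-- count n + n*(n-1)//2 (faster, asymptotic). Both A and B sort lst in place (same side effect);
-- the theorems are about the return value.


-- ===== PORT A =====
-- inner-loop body: count += 1; if lst[i] > lst[j]: swap lst[i], lst[j]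
-- (all indices produced by the ranges are nonnegative and in range, so Nat ranges / List.getD / List.set are exact here)
def pvStepA (i j : Nat) (s : List Int × Int) : List Int × Int :=
  let l := s.1
  let c := s.2 + 1
  if l.getD i 0 > l.getD j 0 then
    let temp := l.getD i 0
    ((l.set i (l.getD j 0)).set j temp, c)
  else (l, c)

-- for j in range(i+1, len(lst)): …
def pvInnerA (n i : Nat) (s : List Int × Int) : List Int × Int :=
  (List.range' (i + 1) (n - (i + 1))).foldl (fun t j => pvStepA i j t) s

def algocomplexitycheck1 (lst : List Int) : Int × Int :=
  let n := lst.length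
  let r := (List.range n).foldl (fun s i => pvInnerA n i (s.1, s.2 + 1)) (lst, 0)
  (r.1.getD 0 0, r.2)   -- min = first element; Pre_ excludes the empty list where Python raises IndexError

-- ===== PORT B =====
def algocomplexitycheck1_alt (lst : List Int) : Int × Int :=
  let s := PySem.List.sorted lst (fun x => x) false   -- lst.sort()
  let n : Int := lst.length
  (s.getD 0 0, n + PySem.Int.floordiv (n * (n - 1)) 2)   -- first sorted element; Pre_ excludes the empty list

-- ===== PRECONDITION & SPEC =====
-- Pre_ excludes exactly the empty list, where both Pythons raise IndexError reading the first element.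
def Pre_algocomplexitycheck1 (lst : List Int) : Prop := lst ≠ []
instance (lst : List Int) : Decidable (Pre_algocomplexitycheck1 lst) := by unfold Pre_algocomplexitycheck1; infer_instance
def pvWitness_algocomplexitycheck1 : List Int := [3, 1, 2]

def Spec_algocomplexitycheck1 (lst : List Int) (out : Int × Int) : Prop := out = algocomplexitycheck1_alt lst
instance (lst : List Int) (out : Int × Int) : Decidable (Spec_algocomplexitycheck1 lst out) := by unfold Spec_algocomplexitycheck1; infer_instance

-- ===== CLAIM (what is proved, stated in full; the proofs are below) =====
def Claim_equal_algocomplexitycheck1 : Prop := ∀ (lst : List Int), Dom_algocomplexitycheck1 lst → Pre_algocomplexitycheck1 lst → Spec_algocomplexitycheck1 lst (algocomplexitycheck1 lst)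

-- ===== LEMMAS AND PROOFS =====
lemma pvGetD_set_self (l : List Int) (n : Nat) (v : Int) (h : n < l.length) :
    (l.set n v).getD n 0 = v := by
  rw [List.getD_eq_getElem _ _ (by simpa using h)]
  exact List.getElem_set_self _

lemma pvGetD_set_ne (l : List Int) (n m : Nat) (v : Int) (h : m ≠ n) :
    (l.set n v).getD m 0 = l.getD m 0 := by
  simp [List.getD_eq_getElem?_getD, List.getElem?_set_ne (Ne.symm h)]

lemma pvSwap_perm (l : List Int) (i j : Nat) (hi : i < l.length) (hj : j < l.length) :
    ((l.set i (l.getD j 0)).set j (l.getD i 0)).Perm l := by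
  rw [List.getD_eq_getElem _ _ hi, List.getD_eq_getElem _ _ hj]
  have h := Array.swap_perm (xs := l.toArray) (i := i) (j := j) (by simpa) (by simpa)
  rw [Array.perm_iff_toList_perm] at h
  simpa [Array.swap] using h

lemma pvInner_snd (J : List Nat) (i : Nat) (s : List Int × Int) :
    (J.foldl (fun t j => pvStepA i j t) s).2 = s.2 + J.length := by
  induction J generalizing s with
  | nil => simp
  | cons j J ih =>
      simp only [List.foldl_cons, ih]
      simp [pvStepA]
      split <;> push_cast <;> ring

lemma pvInner_zero_spec (J : List Nat) (l : List Int) (c : Int)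
    (hJ : ∀ j ∈ J, j < l.length)
    (hmin : ∀ k, k < l.length → k ∉ J → l.getD 0 0 ≤ l.getD k 0) :
    (J.foldl (fun t j => pvStepA 0 j t) (l, c)).1.Perm l ∧
    (∀ k, k < l.length → (J.foldl (fun t j => pvStepA 0 j t) (l, c)).1.getD 0 0 ≤
        (J.foldl (fun t j => pvStepA 0 j t) (l, c)).1.getD k 0) := by
  induction J generalizing l c with
  | nil =>
      refine ⟨List.Perm.refl l, ?_⟩
      intro k hk
      exact hmin k hk (by simp)
  | cons j J ih =>
      have hj : j < l.length := hJ j (by simp)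
      rw [List.foldl_cons]
      by_cases hlt : l.getD 0 0 > l.getD j 0
      · have hj0 : j ≠ 0 := by rintro rfl; exact absurd hlt (lt_irrefl _)
        have h0 : 0 < l.length := Nat.lt_of_le_of_lt (Nat.zero_le j) hj
        have hstep : pvStepA 0 j (l, c) =
            ((l.set 0 (l.getD j 0)).set j (l.getD 0 0), c + 1) := by
          simp only [pvStepA]
          rw [if_pos hlt]
        rw [hstep]
        set l' := (l.set 0 (l.getD j 0)).set j (l.getD 0 0) with hl'
        have hperm : l'.Perm l := pvSwap_perm l 0 j h0 hj
        have hlen : l'.length = l.length := hperm.length_eq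
        have hd0 : l'.getD 0 0 = l.getD j 0 := by
          rw [hl', pvGetD_set_ne _ _ _ _ (Ne.symm hj0), pvGetD_set_self _ _ _ h0]
        have hdj : l'.getD j 0 = l.getD 0 0 := by
          rw [hl']
          exact pvGetD_set_self _ _ _ (by simpa using hj)
        have hother : ∀ k, k ≠ 0 → k ≠ j → l'.getD k 0 = l.getD k 0 := by
          intro k hk0 hkj
          rw [hl', pvGetD_set_ne _ _ _ _ hkj, pvGetD_set_ne _ _ _ _ hk0]
        obtain ⟨p, q⟩ := ih l' (c + 1)
          (fun x hx => hlen ▸ hJ x (List.mem_cons_of_mem _ hx))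
          (by
            intro k hk hkJ
            rw [hd0]
            by_cases hkj : k = j
            · subst hkj; rw [hdj]; exact le_of_lt hlt
            · by_cases hk0 : k = 0
              · subst hk0; rw [hd0]
              · rw [hother k hk0 hkj]
                exact (le_of_lt hlt).trans
                  (hmin k (by omega) (by simp [hkJ, hkj])))
        exact ⟨p.trans hperm, fun k hk => q k (by omega)⟩
      · have hstep : pvStepA 0 j (l, c) = (l, c + 1) := by
          simp only [pvStepA]
          rw [if_neg hlt]
        rw [hstep]
        exact ih l (c + 1) (fun x hx => hJ x (List.mem_cons_of_mem _ hx))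
          (by
            intro k hk hkJ
            by_cases hkj : k = j
            · subst hkj; exact le_of_not_gt hlt
            · exact hmin k hk (by simp [hkJ, hkj]))

lemma pvInner_pos_head (J : List Nat) (i : Nat) (hi : 1 ≤ i) (hJ : ∀ j ∈ J, 1 ≤ j)
    (s : List Int × Int) :
    (J.foldl (fun t j => pvStepA i j t) s).1.getD 0 0 = s.1.getD 0 0 := by
  induction J generalizing s with
  | nil => simp
  | cons j J ih =>
      have hj : 1 ≤ j := hJ j (by simp)
      rw [List.foldl_cons, ih (fun x hx => hJ x (List.mem_cons_of_mem _ hx))]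
      by_cases hlt : s.1.getD i 0 > s.1.getD j 0
      · simp only [pvStepA]
        rw [if_pos hlt, pvGetD_set_ne _ _ _ _ (by omega), pvGetD_set_ne _ _ _ _ (by omega)]
      · simp only [pvStepA]
        rw [if_neg hlt]

lemma pvOuter_pos_head (n : Nat) (I : List Nat) (hI : ∀ i ∈ I, 1 ≤ i) (s : List Int × Int) :
    (I.foldl (fun s i => pvInnerA n i (s.1, s.2 + 1)) s).1.getD 0 0 = s.1.getD 0 0 := by
  induction I generalizing s with
  | nil => simp
  | cons i I ih =>
      have hi : 1 ≤ i := hI i (by simp)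
      rw [List.foldl_cons, ih (fun x hx => hI x (List.mem_cons_of_mem _ hx))]
      exact pvInner_pos_head _ i (by omega)
        (fun j hj => by have := (List.mem_range'_1.mp hj).1; omega) _

lemma pvOuter_snd (n : Nat) (m : Nat) (hm : m ≤ n) (s : List Int × Int) :
    2 * (((List.range m).foldl (fun s i => pvInnerA n i (s.1, s.2 + 1)) s).2 - s.2) =
      2 * m * n - m * (m - 1) := by
  induction m generalizing s with
  | zero => simp
  | succ m ih =>
      rw [List.range_succ, List.foldl_append]
      have ihm := ih (by omega) s
      set r := (List.range m).foldl (fun s i => pvInnerA n i (s.1, s.2 + 1)) s with hr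
      simp only [List.foldl_cons, List.foldl_nil]
      have hsnd : (pvInnerA n m (r.1, r.2 + 1)).2 = r.2 + 1 + ((n - (m + 1) : Nat) : Int) := by
        rw [pvInnerA, pvInner_snd]
        simp
      rw [hsnd]
      have hc : ((n - (m + 1) : Nat) : Int) = (n : Int) - m - 1 := by
        have : m + 1 ≤ n := hm
        push_cast [Nat.cast_sub this]
        ring
      rw [hc]
      push_cast
      linear_combination ihm

lemma pvHead_min (lst : List Int) (h : lst ≠ []) :
    (algocomplexitycheck1 lst).1 ∈ lst ∧ ∀ x ∈ lst, (algocomplexitycheck1 lst).1 ≤ x := by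
  obtain ⟨n, hn⟩ : ∃ n, lst.length = n + 1 := by
    rcases Nat.exists_eq_add_of_lt (List.length_pos_iff.mpr h) with ⟨n, hn⟩
    exact ⟨n, by omega⟩
  have hrange : List.range lst.length = 0 :: (List.range n).map Nat.succ := by
    rw [hn]; exact List.range_succ_eq_map
  simp only [algocomplexitycheck1, hrange, List.foldl_cons]
  obtain ⟨hp, hq⟩ := pvInner_zero_spec (List.range' (0 + 1) (lst.length - (0 + 1))) lst (0 + 1)
    (fun j hj => by have := (List.mem_range'_1.mp hj).2; omega)
    (fun k hk hkJ => by
      have hk0 : k = 0 := by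
        by_contra hne
        exact hkJ (List.mem_range'_1.mpr (by omega))
      subst hk0; exact le_refl _)
  set l1 := ((List.range' (0 + 1) (lst.length - (0 + 1))).foldl
      (fun t j => pvStepA 0 j t) (lst, (0 + 1 : Int))).1 with hl1
  have houter : ((List.map Nat.succ (List.range n)).foldl
      (fun s i => pvInnerA lst.length i (s.1, s.2 + 1))
      (((List.range' (0 + 1) (lst.length - (0 + 1))).foldl
        (fun t j => pvStepA 0 j t) (lst, (0 + 1 : Int))))).1.getD 0 0 = l1.getD 0 0 := by
    exact pvOuter_pos_head _ _ (fun i hi => by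
      rcases List.mem_map.mp hi with ⟨x, _, rfl⟩
      omega) _
  have hlen1 : l1.length = lst.length := hp.length_eq
  have hmem : l1.getD 0 0 ∈ lst := by
    have h1 : l1 ≠ [] := by
      intro hnil
      rw [hnil] at hlen1
      simp at hlen1
      omega
    have : l1.getD 0 0 ∈ l1 := by
      rw [List.getD_eq_getElem _ _ (by simp [hlen1]; omega)]
      exact List.getElem_mem _
    exact hp.subset this
  constructor
  · -- membership
    have : (pvInnerA lst.length 0 (lst, 0 + 1)) =
        ((List.range' (0 + 1) (lst.length - (0 + 1))).foldl (fun t j => pvStepA 0 j t)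
          (lst, (0 + 1 : Int))) := rfl
    rw [this, houter]
    exact hmem
  · intro x hx
    have : (pvInnerA lst.length 0 (lst, 0 + 1)) =
        ((List.range' (0 + 1) (lst.length - (0 + 1))).foldl (fun t j => pvStepA 0 j t)
          (lst, (0 + 1 : Int))) := rfl
    rw [this, houter]
    rcases List.mem_iff_getElem.mp (hp.mem_iff.mpr hx) with ⟨k, hk, hkx⟩
    have := hq k (by omega)
    rw [List.getD_eq_getElem _ _ hk] at this
    rw [hkx] at this
    exact this

lemma pvCount_two (lst : List Int) :
    2 * (algocomplexitycheck1 lst).2 = (lst.length : Int) * lst.length + lst.length := by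
  have := pvOuter_snd lst.length lst.length (le_refl _) (lst, 0)
  simp only [algocomplexitycheck1]
  push_cast at this ⊢
  linear_combination this

-- ===== VERDICT (by name: the statement is the Claim_ definition above) =====

theorem algocomplexitycheck1_spec : Claim_equal_algocomplexitycheck1 := by
  intro lst _ hpre
  unfold Spec_algocomplexitycheck1
  obtain ⟨hmem, hle⟩ := pvHead_min lst hpre
  have hcount := pvCount_two lst
  have hsne : PySem.List.sorted lst (fun x => x) false ≠ [] := by
    intro hnil
    have := PySem.List.sorted_perm (xs := lst) (key := fun x => x) (rev := false)
    rw [hnil] at this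
    exact hpre (this.symm.eq_nil ▸ rfl)
  obtain ⟨m, t, hmt⟩ := List.exists_cons_of_ne_nil hsne
  have hmle : ∀ y ∈ lst, m ≤ y := PySem.List.key_head_sorted_le lst (fun x => x) hmt
  have hmmem : m ∈ lst := by
    have : m ∈ PySem.List.sorted lst (fun x => x) false := by rw [hmt]; simp
    exact (PySem.List.sorted_perm lst (fun x => x) false).subset this
  have hfst : (algocomplexitycheck1 lst).1 = m :=
    le_antisymm (hle m hmmem) (hmle _ hmem)
  have hn1 : (1 : Int) ≤ lst.length := by
    have := List.length_pos_iff.mpr hpre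
    omega
  simp only [algocomplexitycheck1_alt, hmt]
  refine Prod.ext ?_ ?_
  · simpa using hfst
  · show (algocomplexitycheck1 lst).2 = _
    rw [PySem.Int.floordiv_eq_ediv_of_pos (by norm_num)]
    set n : Int := (lst.length : Int) with hn
    have heq : n * (n - 1) = 2 * ((algocomplexitycheck1 lst).2 - n) := by ring_nf; linarith [hcount]
    rw [heq, Int.mul_ediv_cancel_left _ (by norm_num)]
    ring
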